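-- pv_equiv track=rewrite | github.com/igorvanloo/Project-Euler-Explained | Finished Problems/pe00193 - Square Free Numbers.py | mobius_k_sieve
-- ===== SOURCE A (Python) =====
-- def mobius_k_sieve(n, k):
--     isprime = [1]*(n + 1)
--     isprime[0] = isprime[1] = 0
--     mob = [0] + [1]*(n)
--     for p in range(2, n + 1):
--         if isprime[p]:
--             mob[p] *= -1
--             for i in range(2*p, n + 1, p):
--                 isprime[i] = 0
--                 mob[i] *= -1
--             sq = pow(p, k)
--             if sq <= n:
--                 for j in range(sq, n + 1, sq):
--                     mob[j] = 0
--     return isprime, mob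
-- ===== SOURCE B (Python) =====
-- def mobius_k_sieve(n, k):
--     # Per-index trial-division factorization instead of a shared sieve:
--     # for each i, count distinct prime factors (sign) and test k-freeness directly.
--     isprime = []
--     mob = []
--     for i in range(n + 1):
--         m = i
--         d = 2
--         distinct = 0
--         kfree = True
--         while d * d <= m:
--             if m % d == 0:
--                 e = 0
--                 while m % d == 0:
--                     m //= d
--                     e += 1
--                 distinct += 1
--                 if e >= k:
--                     kfree = False
--             d += 1
--         if m > 1:
--             distinct += 1
--             if 1 >= k:
--                 kfree = False
--         isprime.append(1 if (i >= 2 and m == i) else 0)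
--         mob.append(0 if (i == 0 or not kfree) else (-1) ** distinct)
--     return isprime, mob
-- ===== Notes on version B (the rewrite author's own statement) =====
-- stated objective: alternative
-- what changed: Replaces the Eratosthenes-style shared-array sieve (outer loop over primes, inner marking loops) by an independent per-index trial-division factorization that computes primality, the distinct-prime sign and k-freeness of each i directly.
-- outside the precondition, e.g. on mobius_k_sieve(2, 0): A returns ([0, 0, 1], [0, 0, 0]), B returns ([0, 0, 1], [0, 1, 0])
import Mathlib
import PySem

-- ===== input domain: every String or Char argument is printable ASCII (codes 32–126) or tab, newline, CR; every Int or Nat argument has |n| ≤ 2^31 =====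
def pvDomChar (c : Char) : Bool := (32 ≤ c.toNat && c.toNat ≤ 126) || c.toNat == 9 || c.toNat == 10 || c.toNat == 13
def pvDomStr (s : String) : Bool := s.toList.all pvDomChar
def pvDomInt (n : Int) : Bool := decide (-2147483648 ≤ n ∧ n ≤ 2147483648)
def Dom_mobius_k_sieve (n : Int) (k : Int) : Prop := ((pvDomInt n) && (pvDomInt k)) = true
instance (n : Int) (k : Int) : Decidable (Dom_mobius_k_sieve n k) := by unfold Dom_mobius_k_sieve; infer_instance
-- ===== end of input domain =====

-- B replaces A's shared-array prime sieve by an independent per-index trial-division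
-- factorization (objective: alternative algorithm, similar size; no speed claim).

-- ===== PORT A =====
-- Index helpers: every index used below is provably in range inside Pre_, where
-- List.set / List.getD are exact for Python's l[i] = v / l[i].
def setI (l : List Int) (i : Int) (v : Int) : List Int := l.set i.toNat v
def getI (l : List Int) (i : Int) : Int := l.getD i.toNat 0

-- Literal port of A.  `pow(p, k)` is reached only when n ≥ 2, where Pre_ gives k ≥ 1,
-- so `p ^ k.toNat` is exact there.  (For n ≤ 0 Python raises IndexError on the
-- initial assignments — outside Pre_; List.set is then a no-op.)
def mobius_k_sieve (n : Int) (k : Int) : List Int × List Int :=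
  let isprime := ((List.replicate (n + 1).toNat 1).set 0 0).set 1 0
  let mob := 0 :: List.replicate n.toNat 1
  (PySem.List.pyRange 2 (n + 1) 1).foldl (fun st p =>
    if getI st.1 p ≠ 0 then
      let mob1 := setI st.2 p (getI st.2 p * (-1))
      let st2 := (PySem.List.pyRange (2 * p) (n + 1) p).foldl
        (fun st i => (setI st.1 i 0, setI st.2 i (getI st.2 i * (-1)))) (st.1, mob1)
      let sq := p ^ k.toNat
      if sq ≤ n then
        (st2.1, (PySem.List.pyRange sq (n + 1) sq).foldl (fun mo j => setI mo j 0) st2.2)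
      else st2
    else st) (isprime, mob)

-- ===== PORT B =====
-- inner `while m % d == 0: m //= d; e += 1` loop of Source B
-- (fuel makes the recursion structural; m ≤ fuel suffices, the callers pass enough)
def pvExtract : Nat → Nat → Nat → Nat × Nat
  | 0, m, _ => (0, m)
  | fuel + 1, m, d =>
    if 2 ≤ d ∧ 0 < m ∧ m % d = 0 then
      let r := pvExtract fuel (m / d) d
      (r.1 + 1, r.2)
    else (0, m)

-- tail-recursive port of Source B's factorization while-loop (fuel-guarded; 2*m+2-d steps suffice)
def pvTrial : Nat → Int → Nat → Nat → Nat → Bool → Nat × Bool × Nat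
  | 0, _, m, _, dist, kfree => (dist, kfree, m)
  | fuel + 1, k, m, d, dist, kfree =>
    if d * d ≤ m then
      if m % d = 0 then
        let r := pvExtract m m d
        pvTrial fuel k r.2 (d + 1) (dist + 1) (kfree && !(decide ((r.1 : Int) ≥ k)))
      else pvTrial fuel k m (d + 1) dist kfree
    else (dist, kfree, m)

def mobius_k_sieve_alt (n : Int) (k : Int) : List Int × List Int :=
  let rows := (PySem.List.pyRange 0 (n + 1) 1).map (fun i =>
    let t := pvTrial (2 * i.toNat + 2) k i.toNat 2 0 true
    let s := if 1 < t.2.2 then (t.1 + 1, t.2.1 && !(decide ((1 : Int) ≥ k)), t.2.2) else t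
    ((if 2 ≤ i ∧ (t.2.2 : Int) = i then (1 : Int) else 0),
     (if i = 0 ∨ s.2.1 = false then (0 : Int) else (-1) ^ s.1)))
  (rows.map Prod.fst, rows.map Prod.snd)

-- ===== PRECONDITION & SPEC =====
-- Pre_ excludes: n ≤ 0 (A raises IndexError on the initial assignments), k < 0 with
-- n ≥ 2 (pow(p, k) is a float, so range(sq, ...) raises TypeError), and k = 0 with
-- n ≥ 2 — a degenerate corner where A's p**0 = 1 zeroes every mob entry including
-- mob[1], and both that and B's mob[1] = 1 are defensible readings of "0-free".
def Pre_mobius_k_sieve (n : Int) (k : Int) : Prop := 1 ≤ n ∧ (1 ≤ k ∨ n = 1)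
instance (n : Int) (k : Int) : Decidable (Pre_mobius_k_sieve n k) := by
  unfold Pre_mobius_k_sieve; infer_instance
def pvWitness_mobius_k_sieve : Int × Int := (10, 2)

def Spec_mobius_k_sieve (n : Int) (k : Int) (out : List Int × List Int) : Prop := out = mobius_k_sieve_alt n k
instance (n : Int) (k : Int) (out : List Int × List Int) : Decidable (Spec_mobius_k_sieve n k out) := by unfold Spec_mobius_k_sieve; infer_instance

-- ===== CLAIM (what is proved, stated in full; the proofs are below) =====
def Claim_equal_mobius_k_sieve : Prop := ∀ (n : Int) (k : Int), Dom_mobius_k_sieve n k → Pre_mobius_k_sieve n k → Spec_mobius_k_sieve n k (mobius_k_sieve n k)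

-- ===== LEMMAS AND PROOFS =====

-- ---- reference functions describing A's arrays after the outer loop has
-- ---- processed the values 2..q (q ≥ 1); N = n.toNat, k' = k.toNat ----

-- i is marked composite once some prime p ≤ q with p ∣ i, p ≠ i was processed
abbrev pvMarked (q i : ℕ) : Prop := ∃ p ∈ Finset.range (q + 1), p.Prime ∧ p ∣ i ∧ p ≠ i
-- mob[i] was zeroed once some processed prime p had p^k' ≤ N and p^k' ∣ i
abbrev pvZeroed (N k' q i : ℕ) : Prop := ∃ p ∈ Finset.range (q + 1), p.Prime ∧ p ^ k' ≤ N ∧ p ^ k' ∣ i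
-- number of processed primes dividing i (each flipped mob[i]'s sign once)
def pvPcount (q i : ℕ) : ℕ := ((Finset.range (q + 1)).filter (fun p => p.Prime ∧ p ∣ i)).card

def pvIRef (q i : ℕ) : ℤ := if 2 ≤ i ∧ ¬ pvMarked q i then 1 else 0
def pvMRef (N k' q i : ℕ) : ℤ :=
  if i = 0 then 0 else if pvZeroed N k' q i then 0 else (-1) ^ pvPcount q i

def pvBody (n k : ℤ) : List ℤ × List ℤ → ℤ → List ℤ × List ℤ := fun st p =>
    if getI st.1 p ≠ 0 then
      let mob1 := setI st.2 p (getI st.2 p * (-1))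
      let st2 := (PySem.List.pyRange (2 * p) (n + 1) p).foldl
        (fun st i => (setI st.1 i 0, setI st.2 i (getI st.2 i * (-1)))) (st.1, mob1)
      let sq := p ^ k.toNat
      if sq ≤ n then
        (st2.1, (PySem.List.pyRange sq (n + 1) sq).foldl (fun mo j => setI mo j 0) st2.2)
      else st2
    else st

def pvTgt (n k q : ℤ) : List ℤ × List ℤ :=
  ((List.range (n.toNat + 1)).map (fun i => pvIRef q.toNat i),
   (List.range (n.toNat + 1)).map (fun i => pvMRef n.toNat k.toNat q.toNat i))

theorem pvA_eq_fold (n k : ℤ) :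
    mobius_k_sieve n k = (PySem.List.pyRange 2 (n + 1) 1).foldl (pvBody n k)
      ((((List.replicate (n + 1).toNat 1).set 0 0).set 1 0), 0 :: List.replicate n.toNat 1) := rfl

-- ---- list-as-map-of-range machinery ----

theorem pvMapRangeSet (m : ℕ) (f : ℕ → ℤ) (j : ℕ) (v : ℤ) :
    ((List.range m).map f).set j v = (List.range m).map (fun i => if i = j then v else f i) := by
  apply List.ext_getElem
  · simp
  · intro i h1 h2
    simp only [List.length_set, List.length_map, List.length_range] at h1 h2
    by_cases hij : i = j
    · subst hij
      rw [List.getElem_set_self (by simpa using h2)]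
      simp
    · rw [List.getElem_set_ne (by omega)]
      simp [hij]

theorem pvGetIMapRange {m : ℕ} {p : ℤ} (f : ℕ → ℤ) (h0 : 0 ≤ p) (hlt : p.toNat < m) :
    getI ((List.range m).map f) p = f p.toNat := by
  simp [getI, List.getD_eq_getElem?_getD, List.getElem?_map, List.getElem?_range, hlt]

theorem pvFoldlSet (m : ℕ) (u : ℕ → ℤ → ℤ) : ∀ (J : List ℤ) (f : ℕ → ℤ), J.Nodup →
    (∀ j ∈ J, 0 ≤ j ∧ j.toNat < m) →
    J.foldl (fun l j => setI l j (u j.toNat (getI l j))) ((List.range m).map f)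
      = (List.range m).map (fun i : ℕ => if (i : ℤ) ∈ J then u i (f i) else f i) := by
  intro J
  induction J with
  | nil => intro f _ _; simp
  | cons j J ih =>
    intro f hnd hb
    obtain ⟨hj0, hjm⟩ := hb j (by simp)
    have hcast : ((j.toNat : ℕ) : ℤ) = j := Int.toNat_of_nonneg hj0
    simp only [List.foldl_cons]
    rw [show setI ((List.range m).map f) j (u j.toNat (getI ((List.range m).map f) j))
        = ((List.range m).map f).set j.toNat (u j.toNat (f j.toNat)) by
          rw [pvGetIMapRange f hj0 hjm]; rfl]
    rw [pvMapRangeSet m f j.toNat (u j.toNat (f j.toNat))]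
    rw [ih _ (List.nodup_cons.mp hnd).2 (fun x hx => hb x (by simp [hx]))]
    apply List.map_congr_left
    intro i hi
    by_cases hij : i = j.toNat
    · subst hij
      have hmemJ : ((j.toNat : ℕ) : ℤ) ∉ J := by
        rw [hcast]; exact (List.nodup_cons.mp hnd).1
      have hmemJ' : j ∉ J := hcast ▸ hmemJ
      simp [hcast, hmemJ']
    · have hne : (i : ℤ) ≠ j := by
        intro h; apply hij; rw [← hcast] at h; exact_mod_cast h
      simp only [List.mem_cons, hne, false_or]
      by_cases hmem : (i : ℤ) ∈ J <;> simp [hmem, hij]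

theorem pvFoldlSetZero (m : ℕ) (J : List ℤ) (f : ℕ → ℤ) (hnd : J.Nodup)
    (hb : ∀ j ∈ J, 0 ≤ j ∧ j.toNat < m) :
    J.foldl (fun l j => setI l j 0) ((List.range m).map f)
      = (List.range m).map (fun i : ℕ => if (i : ℤ) ∈ J then 0 else f i) := by
  exact pvFoldlSet m (fun _ _ => 0) J f hnd hb

theorem pvFoldlSetFlip (m : ℕ) (J : List ℤ) (f : ℕ → ℤ) (hnd : J.Nodup)
    (hb : ∀ j ∈ J, 0 ≤ j ∧ j.toNat < m) :
    J.foldl (fun l j => setI l j (getI l j * (-1))) ((List.range m).map f)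
      = (List.range m).map (fun i : ℕ => if (i : ℤ) ∈ J then f i * (-1) else f i) := by
  exact pvFoldlSet m (fun _ x => x * (-1)) J f hnd hb

theorem pvNodupPyRange (a b s : ℤ) (hs : 0 < s) : (PySem.List.pyRange a b s).Nodup := by
  rw [PySem.List.pyRange_of_pos _ _ hs]
  refine List.Nodup.map ?_ (List.nodup_range)
  intro x y h
  have h2 : (s : ℤ) * (x : ℤ) = s * y := by linarith
  exact_mod_cast mul_left_cancel₀ (ne_of_gt hs) h2

theorem pvMemStep2 {P i N : ℕ} (hP : 0 < P) :
    ((i : ℤ) ∈ PySem.List.pyRange (2 * (P : ℤ)) ((N : ℤ) + 1) (P : ℤ)) ↔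
      (2 * P ≤ i ∧ i ≤ N ∧ P ∣ i) := by
  rw [PySem.List.mem_pyRange_iff_of_pos (by exact_mod_cast hP)]
  have hd : (P : ℤ) ∣ 2 * (P : ℤ) := ⟨2, by ring⟩
  constructor
  · rintro ⟨h1, h2, h3⟩
    have hdi : (P : ℤ) ∣ (i : ℤ) := by
      have := dvd_add h3 hd
      simpa using this
    exact ⟨by exact_mod_cast h1, by omega, by exact_mod_cast hdi⟩
  · rintro ⟨h1, h2, h3⟩
    refine ⟨by exact_mod_cast h1, by omega, ?_⟩
    exact dvd_sub (by exact_mod_cast h3) hd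

theorem pvMemStep3 {S i N : ℕ} (hS : 0 < S) :
    ((i : ℤ) ∈ PySem.List.pyRange (S : ℤ) ((N : ℤ) + 1) (S : ℤ)) ↔
      (S ≤ i ∧ i ≤ N ∧ S ∣ i) := by
  rw [PySem.List.mem_pyRange_iff_of_pos (by exact_mod_cast hS)]
  constructor
  · rintro ⟨h1, h2, h3⟩
    have hdi : (S : ℤ) ∣ (i : ℤ) := by
      have := dvd_add h3 (dvd_refl (S : ℤ))
      simpa using this
    exact ⟨by exact_mod_cast h1, by omega, by exact_mod_cast hdi⟩
  · rintro ⟨h1, h2, h3⟩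
    refine ⟨by exact_mod_cast h1, by omega, ?_⟩
    exact dvd_sub (by exact_mod_cast h3) (dvd_refl _)

-- ---- number-theoretic facts about the reference functions ----

theorem pvCompositeWitness {c : ℕ} (h2 : 2 ≤ c) (hc : ¬ c.Prime) :
    ∃ r, r.Prime ∧ r ∣ c ∧ r < c := by
  refine ⟨c.minFac, Nat.minFac_prime (by omega), Nat.minFac_dvd c, ?_⟩
  rcases lt_or_eq_of_le (Nat.minFac_le (by omega : 0 < c)) with h | h
  · exact h
  · exact absurd (h ▸ Nat.minFac_prime (show c ≠ 1 by omega)) hc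

theorem pvMarkedSucc (Q i : ℕ) :
    pvMarked (Q + 1) i ↔ pvMarked Q i ∨ ((Q + 1).Prime ∧ (Q + 1) ∣ i ∧ (Q + 1) ≠ i) := by
  unfold pvMarked
  rw [Finset.range_add_one]
  simp only [Finset.mem_insert]
  constructor
  · rintro ⟨p, hp | hp, h⟩
    · exact Or.inr (hp ▸ h)
    · exact Or.inl ⟨p, hp, h⟩
  · rintro (⟨p, hp, h⟩ | h)
    · exact ⟨p, Or.inr hp, h⟩
    · exact ⟨Q + 1, Or.inl rfl, h⟩

theorem pvZeroedSucc (N k' Q i : ℕ) :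
    pvZeroed N k' (Q + 1) i ↔ pvZeroed N k' Q i ∨
      ((Q + 1).Prime ∧ (Q + 1) ^ k' ≤ N ∧ (Q + 1) ^ k' ∣ i) := by
  unfold pvZeroed
  rw [Finset.range_add_one]
  simp only [Finset.mem_insert]
  constructor
  · rintro ⟨p, hp | hp, h⟩
    · exact Or.inr (hp ▸ h)
    · exact Or.inl ⟨p, hp, h⟩
  · rintro (⟨p, hp, h⟩ | h)
    · exact ⟨p, Or.inr hp, h⟩
    · exact ⟨Q + 1, Or.inl rfl, h⟩

theorem pvPcountSucc (Q i : ℕ) :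
    pvPcount (Q + 1) i = pvPcount Q i + (if (Q + 1).Prime ∧ (Q + 1) ∣ i then 1 else 0) := by
  unfold pvPcount
  rw [Finset.range_add_one, Finset.filter_insert]
  have hnm : (Q + 1) ∉ (Finset.range (Q + 1)).filter (fun p => p.Prime ∧ p ∣ i) := by
    simp
  split
  · rw [Finset.card_insert_of_notMem hnm]
  · simp

theorem pvMulGe {P i : ℕ} (h : P ∣ i) (h1 : 1 ≤ i) (hne : i ≠ P) : 2 * P ≤ i := by
  obtain ⟨c, rfl⟩ := h
  have hc2 : 2 ≤ c := by
    rcases Nat.lt_or_ge c 2 with hlt | hge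
    · interval_cases c <;> omega
    · exact hge
  nlinarith

theorem pvZeroedPrimeSelf {Q N k' : ℕ} (hP : (Q + 1).Prime) (hk' : 1 ≤ k') :
    ¬ pvZeroed N k' Q (Q + 1) := by
  rintro ⟨r, hrmem, hrp, _, hrd⟩
  have hrQ : r < Q + 1 := Finset.mem_range.mp hrmem
  have hrd' : r ∣ Q + 1 := dvd_trans (dvd_pow_self r (by omega : k' ≠ 0)) hrd
  rcases (Nat.Prime.eq_one_or_self_of_dvd hP r hrd') with h | h
  · exact hrp.one_lt.ne' h
  · omega

theorem pvPcountPrimeSelf {Q : ℕ} (hP : (Q + 1).Prime) : pvPcount Q (Q + 1) = 0 := by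
  unfold pvPcount
  rw [Finset.card_eq_zero, Finset.filter_eq_empty_iff]
  rintro r hrmem ⟨hrp, hrd⟩
  have hrQ : r < Q + 1 := Finset.mem_range.mp hrmem
  rcases (Nat.Prime.eq_one_or_self_of_dvd hP r hrd) with h | h
  · exact hrp.one_lt.ne' h
  · omega

theorem pvIRefSelf (Q : ℕ) (h : 1 ≤ Q) :
    pvIRef Q (Q + 1) = if (Q + 1).Prime then 1 else 0 := by
  have h2 : 2 ≤ Q + 1 := by omega
  by_cases hp : (Q + 1).Prime
  · have hnm : ¬ pvMarked Q (Q + 1) := by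
      rintro ⟨p, hpmem, hpp, hpd, hpne⟩
      have hpQ : p < Q + 1 := Finset.mem_range.mp hpmem
      rcases Nat.Prime.eq_one_or_self_of_dvd hp p hpd with h | h
      · exact hpp.one_lt.ne' h
      · omega
    simp [pvIRef, hp, h2, hnm]
  · obtain ⟨r, hrp, hrd, hrlt⟩ := pvCompositeWitness h2 hp
    have hm : pvMarked Q (Q + 1) :=
      ⟨r, Finset.mem_range.mpr (by omega), hrp, hrd, by omega⟩
    simp [pvIRef, hp, hm]

theorem pvIRefNotPrime {Q : ℕ} (h : ¬ (Q + 1).Prime) (i : ℕ) : pvIRef (Q + 1) i = pvIRef Q i := by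
  simp [pvIRef, pvMarkedSucc, h]

theorem pvMRefNotPrime {Q : ℕ} (h : ¬ (Q + 1).Prime) (N k' i : ℕ) :
    pvMRef N k' (Q + 1) i = pvMRef N k' Q i := by
  simp [pvMRef, pvZeroedSucc, pvPcountSucc, h]

theorem pvIRefStep {Q N i : ℕ} (hP : (Q + 1).Prime) (hPN : Q + 1 ≤ N) (hi : i < N + 1) :
    (if 2 * (Q + 1) ≤ i ∧ i ≤ N ∧ (Q + 1) ∣ i then (0 : ℤ) else pvIRef Q i) = pvIRef (Q + 1) i := by
  by_cases h2i : 2 ≤ i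
  · by_cases hJ : 2 * (Q + 1) ≤ i ∧ i ≤ N ∧ (Q + 1) ∣ i
    · have hm : pvMarked (Q + 1) i := (pvMarkedSucc Q i).mpr
        (Or.inr ⟨hP, hJ.2.2, by omega⟩)
      simp [pvIRef, hJ, hm]
    · have hnew : ¬ ((Q + 1).Prime ∧ (Q + 1) ∣ i ∧ (Q + 1) ≠ i) := by
        rintro ⟨_, hd, hne⟩
        exact hJ ⟨pvMulGe hd (by omega) (by omega), by omega, hd⟩
      rw [if_neg hJ]
      simp [pvIRef, pvMarkedSucc, hnew]
  · have hJ : ¬ (2 * (Q + 1) ≤ i ∧ i ≤ N ∧ (Q + 1) ∣ i) := by omega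
    simp [pvIRef, h2i, hJ]

theorem pvMRefSelfPrime {Q N k' : ℕ} (hP : (Q + 1).Prime) (hk' : 1 ≤ k') :
    pvMRef N k' Q (Q + 1) = 1 := by
  unfold pvMRef
  rw [if_neg (by omega), if_neg (pvZeroedPrimeSelf hP hk'), pvPcountPrimeSelf hP]
  simp

theorem pvMRefStep {Q N k' i : ℕ} (hP : (Q + 1).Prime) (hPN : Q + 1 ≤ N) (hk' : 1 ≤ k')
    (hi : i < N + 1) (hg : (Q + 1) ^ k' ≤ N) :
    (if (Q + 1) ^ k' ≤ i ∧ i ≤ N ∧ (Q + 1) ^ k' ∣ i then (0 : ℤ)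
     else (if 2 * (Q + 1) ≤ i ∧ i ≤ N ∧ (Q + 1) ∣ i
           then (if i = Q + 1 then pvMRef N k' Q (Q + 1) * (-1) else pvMRef N k' Q i) * (-1)
           else (if i = Q + 1 then pvMRef N k' Q (Q + 1) * (-1) else pvMRef N k' Q i)))
      = pvMRef N k' (Q + 1) i := by
  have hk0 : k' ≠ 0 := by omega
  have hS2 : 2 ≤ (Q + 1) ^ k' := le_trans hP.two_le (Nat.le_self_pow hk0 (Q + 1))
  by_cases hi0 : i = 0
  · subst hi0
    rw [if_neg (by rintro ⟨h, _, _⟩; omega), if_neg (by rintro ⟨h, _, _⟩; omega)]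
    simp [pvMRef]
  · by_cases hdvd : (Q + 1) ∣ i
    · have hpc : pvPcount (Q + 1) i = pvPcount Q i + 1 := by
        rw [pvPcountSucc]; simp [hP, hdvd]
      by_cases hiP : i = Q + 1
      · subst hiP
        have hcond : ((Q + 1) ^ k' ≤ Q + 1 ∧ Q + 1 ≤ N ∧ (Q + 1) ^ k' ∣ (Q + 1))
            ↔ ((Q + 1) ^ k' ≤ N ∧ (Q + 1) ^ k' ∣ (Q + 1)) := by
          constructor
          · rintro ⟨_, _, h2⟩; exact ⟨hg, h2⟩
          · rintro ⟨_, h2⟩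
            exact ⟨Nat.le_of_dvd (by omega) h2, hPN, h2⟩
        have hz : pvZeroed N k' (Q + 1) (Q + 1) ↔
            ((Q + 1) ^ k' ≤ N ∧ (Q + 1) ^ k' ∣ (Q + 1)) := by
          rw [pvZeroedSucc]
          constructor
          · rintro (h | ⟨_, h1, h2⟩)
            · exact absurd h (pvZeroedPrimeSelf hP hk')
            · exact ⟨h1, h2⟩
          · rintro ⟨h1, h2⟩; exact Or.inr ⟨hP, h1, h2⟩
        rw [if_neg (by omega : ¬ (2 * (Q + 1) ≤ Q + 1 ∧ Q + 1 ≤ N ∧ (Q + 1) ∣ Q + 1))]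
        rw [if_pos rfl, pvMRefSelfPrime hP hk']
        unfold pvMRef
        rw [if_neg (by omega : ¬ Q + 1 = 0), hpc, pvPcountPrimeSelf hP]
        by_cases hc : (Q + 1) ^ k' ≤ N ∧ (Q + 1) ^ k' ∣ (Q + 1)
        · rw [if_pos (hcond.mpr hc), if_pos (hz.mpr hc)]
        · rw [if_neg (fun h => hc (hcond.mp h)), if_neg (fun h => hc (hz.mp h))]
          norm_num
      · have hJ2 : 2 * (Q + 1) ≤ i ∧ i ≤ N ∧ (Q + 1) ∣ i :=
          ⟨pvMulGe hdvd (by omega) hiP, by omega, hdvd⟩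
        have hJ3 : ((Q + 1) ^ k' ≤ i ∧ i ≤ N ∧ (Q + 1) ^ k' ∣ i)
            ↔ ((Q + 1) ^ k' ≤ N ∧ (Q + 1) ^ k' ∣ i) := by
          constructor
          · rintro ⟨_, _, h2⟩; exact ⟨hg, h2⟩
          · rintro ⟨_, h2⟩
            exact ⟨Nat.le_of_dvd (by omega) h2, by omega, h2⟩
        rw [if_pos hJ2, if_neg hiP]
        unfold pvMRef
        rw [if_neg hi0, if_neg hi0, hpc]
        by_cases hz : pvZeroed N k' Q i
        · rw [if_pos hz, if_pos ((pvZeroedSucc N k' Q i).mpr (Or.inl hz))]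
          split <;> norm_num
        · by_cases hc : (Q + 1) ^ k' ≤ N ∧ (Q + 1) ^ k' ∣ i
          · rw [if_pos (hJ3.mpr hc),
                if_pos ((pvZeroedSucc N k' Q i).mpr (Or.inr ⟨hP, hc.1, hc.2⟩))]
          · rw [if_neg (fun h => hc (hJ3.mp h)), if_neg hz,
                if_neg (fun h => by
                  rcases (pvZeroedSucc N k' Q i).mp h with h | ⟨_, h1, h2⟩
                  exacts [hz h, hc ⟨h1, h2⟩]),
                pow_succ]
    · have hiP : i ≠ Q + 1 := by rintro rfl; exact hdvd dvd_rfl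
      have hJ2 : ¬ (2 * (Q + 1) ≤ i ∧ i ≤ N ∧ (Q + 1) ∣ i) := by
        rintro ⟨_, _, h⟩; exact hdvd h
      have hJ3 : ¬ ((Q + 1) ^ k' ≤ i ∧ i ≤ N ∧ (Q + 1) ^ k' ∣ i) := by
        rintro ⟨_, _, h⟩
        exact hdvd (dvd_trans (dvd_pow_self (Q + 1) hk0) h)
      have hzeq : pvZeroed N k' (Q + 1) i ↔ pvZeroed N k' Q i := by
        rw [pvZeroedSucc]
        constructor
        · rintro (h | ⟨_, _, h⟩)
          · exact h
          · exact absurd (dvd_trans (dvd_pow_self (Q + 1) hk0) h) hdvd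
        · exact Or.inl
      rw [if_neg hJ3, if_neg hJ2, if_neg hiP]
      unfold pvMRef
      rw [if_neg hi0, if_neg hi0, pvPcountSucc,
          if_neg (by rintro ⟨_, h⟩; exact hdvd h : ¬ ((Q + 1).Prime ∧ (Q + 1) ∣ i))]
      by_cases hz : pvZeroed N k' Q i
      · rw [if_pos hz, if_pos (hzeq.mpr hz)]
      · rw [if_neg hz, if_neg (fun h => hz (hzeq.mp h))]
        norm_num

theorem pvMRefStepNoGuard {Q N k' i : ℕ} (hP : (Q + 1).Prime) (hPN : Q + 1 ≤ N) (hk' : 1 ≤ k')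
    (hi : i < N + 1) (hg : ¬ (Q + 1) ^ k' ≤ N) :
    (if 2 * (Q + 1) ≤ i ∧ i ≤ N ∧ (Q + 1) ∣ i
           then (if i = Q + 1 then pvMRef N k' Q (Q + 1) * (-1) else pvMRef N k' Q i) * (-1)
           else (if i = Q + 1 then pvMRef N k' Q (Q + 1) * (-1) else pvMRef N k' Q i))
      = pvMRef N k' (Q + 1) i := by
  have hk0 : k' ≠ 0 := by omega
  have hzeq : ∀ j : ℕ, pvZeroed N k' (Q + 1) j ↔ pvZeroed N k' Q j := by
    intro j
    rw [pvZeroedSucc]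
    constructor
    · rintro (h | ⟨_, h1, _⟩)
      · exact h
      · exact absurd h1 hg
    · exact Or.inl
  by_cases hi0 : i = 0
  · subst hi0
    rw [if_neg (by rintro ⟨h, _, _⟩; omega)]
    simp [pvMRef]
  · by_cases hdvd : (Q + 1) ∣ i
    · have hpc : pvPcount (Q + 1) i = pvPcount Q i + 1 := by
        rw [pvPcountSucc]; simp [hP, hdvd]
      by_cases hiP : i = Q + 1
      · subst hiP
        rw [if_neg (by omega : ¬ (2 * (Q + 1) ≤ Q + 1 ∧ Q + 1 ≤ N ∧ (Q + 1) ∣ Q + 1))]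
        rw [if_pos rfl, pvMRefSelfPrime hP hk']
        unfold pvMRef
        rw [if_neg (by omega : ¬ Q + 1 = 0), hpc, pvPcountPrimeSelf hP,
            if_neg (fun h => pvZeroedPrimeSelf hP hk' ((hzeq (Q + 1)).mp h))]
        norm_num
      · have hJ2 : 2 * (Q + 1) ≤ i ∧ i ≤ N ∧ (Q + 1) ∣ i :=
          ⟨pvMulGe hdvd (by omega) hiP, by omega, hdvd⟩
        rw [if_pos hJ2, if_neg hiP]
        unfold pvMRef
        rw [if_neg hi0, if_neg hi0, hpc]
        by_cases hz : pvZeroed N k' Q i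
        · rw [if_pos hz, if_pos ((hzeq i).mpr hz)]
          norm_num
        · rw [if_neg hz, if_neg (fun h => hz ((hzeq i).mp h)), pow_succ]
    · have hiP : i ≠ Q + 1 := by rintro rfl; exact hdvd dvd_rfl
      have hJ2 : ¬ (2 * (Q + 1) ≤ i ∧ i ≤ N ∧ (Q + 1) ∣ i) := by
        rintro ⟨_, _, h⟩; exact hdvd h
      rw [if_neg hJ2, if_neg hiP]
      unfold pvMRef
      rw [if_neg hi0, if_neg hi0, pvPcountSucc,
          if_neg (by rintro ⟨_, h⟩; exact hdvd h : ¬ ((Q + 1).Prime ∧ (Q + 1) ∣ i))]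
      by_cases hz : pvZeroed N k' Q i
      · rw [if_pos hz, if_pos ((hzeq i).mpr hz)]
      · rw [if_neg hz, if_neg (fun h => hz ((hzeq i).mp h))]
        norm_num

-- ---- A's loop body preserves the characterization ----

theorem pvMarkedOneFalse (i : ℕ) : ¬ pvMarked 1 i := by
  rintro ⟨p, hpm, hpp, _⟩
  have h1 := Finset.mem_range.mp hpm
  have h2 := hpp.two_le
  omega

theorem pvZeroedOneFalse (N k' i : ℕ) : ¬ pvZeroed N k' 1 i := by
  rintro ⟨p, hpm, hpp, _⟩
  have h1 := Finset.mem_range.mp hpm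
  have h2 := hpp.two_le
  omega

theorem pvPcountOne (i : ℕ) : pvPcount 1 i = 0 := by
  unfold pvPcount
  rw [Finset.card_eq_zero, Finset.filter_eq_empty_iff]
  intro p hp
  rw [Finset.mem_range] at hp
  rintro ⟨hpp, _⟩
  have := hpp.two_le
  omega

theorem pvIRefOne (i : ℕ) : pvIRef 1 i = if 2 ≤ i then 1 else 0 := by
  simp [pvIRef, pvMarkedOneFalse]

theorem pvMRefOne (N k' i : ℕ) : pvMRef N k' 1 i = if i = 0 then 0 else 1 := by
  simp [pvMRef, pvZeroedOneFalse, pvPcountOne]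

theorem pvInit (n k : ℤ) (hn : 1 ≤ n) :
    ((((List.replicate (n + 1).toNat 1).set 0 0).set 1 0), (0 : ℤ) :: List.replicate n.toNat 1)
      = pvTgt n k 1 := by
  have hN : (n + 1).toNat = n.toNat + 1 := by omega
  unfold pvTgt
  simp only [Prod.mk.injEq]
  constructor
  · apply List.ext_getElem
    · simp [hN]
    · intro i h1 h2
      simp only [List.getElem_set, List.getElem_replicate, List.getElem_map, List.getElem_range]
      rw [show ((1 : ℤ).toNat) = 1 from rfl, pvIRefOne]
      split_ifs <;> first | rfl | omega
  · apply List.ext_getElem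
    · simp
    · intro i h1 h2
      simp only [List.getElem_map, List.getElem_range]
      rw [show ((1 : ℤ).toNat) = 1 from rfl, pvMRefOne]
      rcases i with _ | i
      · simp
      · simp

theorem pvStep (n k q : ℤ) (hn : 1 ≤ n) (hk : 1 ≤ k) (hq : 1 ≤ q) (hqn : q + 1 ≤ n) :
    pvBody n k (pvTgt n k q) (q + 1) = pvTgt n k (q + 1) := by
  have hq1 : (q + 1).toNat = q.toNat + 1 := by omega
  set N := n.toNat with hNdef
  set Q := q.toNat with hQdef
  set K := k.toNat with hKdef
  have hK1 : 1 ≤ K := by omega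
  have hQN : Q + 1 ≤ N := by omega
  have hLhs : pvTgt n k q = ((List.range (N + 1)).map (fun i => pvIRef Q i),
      (List.range (N + 1)).map (fun i => pvMRef N K Q i)) := rfl
  have hRhs : pvTgt n k (q + 1) = ((List.range (N + 1)).map (fun i => pvIRef (Q + 1) i),
      (List.range (N + 1)).map (fun i => pvMRef N K (Q + 1) i)) := by
    unfold pvTgt
    rw [hq1]
  rw [hLhs, hRhs]
  unfold pvBody
  dsimp only
  rw [pvGetIMapRange _ (by omega) (by omega : (q + 1).toNat < N + 1), hq1,
    pvIRefSelf Q (by omega)]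
  by_cases hp : (Q + 1).Prime
  · rw [if_pos hp, if_pos (by norm_num : (1 : ℤ) ≠ 0)]
    -- cast the three ranges to ℕ-cast form
    have hc1 : (2 * (q + 1) : ℤ) = 2 * ((Q + 1 : ℕ) : ℤ) := by push_cast; omega
    have hc2 : (n + 1 : ℤ) = ((N : ℕ) : ℤ) + 1 := by omega
    have hc3 : (q + 1 : ℤ) = ((Q + 1 : ℕ) : ℤ) := by push_cast; omega
    have hsq : ((q + 1 : ℤ)) ^ K = ((((Q + 1) ^ K : ℕ) : ℤ)) := by
      rw [hc3]; push_cast; ring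
    -- mob[p] *= -1
    rw [pvGetIMapRange _ (by omega) (by omega : (q + 1).toNat < N + 1), hq1]
    rw [show setI ((List.range (N + 1)).map (fun i => pvMRef N K Q i)) (q + 1)
          (pvMRef N K Q (Q + 1) * (-1))
        = ((List.range (N + 1)).map (fun i => pvMRef N K Q i)).set (Q + 1)
          (pvMRef N K Q (Q + 1) * (-1)) from by rw [setI, hq1]]
    rw [pvMapRangeSet]
    -- the marking loop over multiples of p
    rw [PySem.List.foldl_prod_mk (f := fun l (i : ℤ) => setI l i 0)
      (g := fun l (i : ℤ) => setI l i (getI l i * (-1)))]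
    have hnd2 : (PySem.List.pyRange (2 * (q + 1)) (n + 1) (q + 1)).Nodup :=
      pvNodupPyRange _ _ _ (by omega)
    have hb2 : ∀ j ∈ PySem.List.pyRange (2 * (q + 1)) (n + 1) (q + 1), 0 ≤ j ∧ j.toNat < N + 1 := by
      intro j hj
      rw [PySem.List.mem_pyRange_iff_of_pos (by omega)] at hj
      obtain ⟨ha, hb, -⟩ := hj
      constructor <;> omega
    rw [pvFoldlSetZero (N + 1) _ _ hnd2 hb2, pvFoldlSetFlip (N + 1) _ _ hnd2 hb2]
    have hfst : ((List.range (N + 1)).map (fun i : ℕ =>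
        if (i : ℤ) ∈ PySem.List.pyRange (2 * (q + 1)) (n + 1) (q + 1) then 0 else pvIRef Q i))
        = (List.range (N + 1)).map (fun i => pvIRef (Q + 1) i) := by
      apply List.map_congr_left
      intro i hi
      rw [List.mem_range] at hi
      simp only [hc1, hc2, hc3, pvMemStep2 (show 0 < Q + 1 by omega)]
      by_cases hm : 2 * (Q + 1) ≤ i ∧ i ≤ N ∧ (Q + 1) ∣ i
      · rw [if_pos hm, ← pvIRefStep hp hQN hi, if_pos hm]
      · rw [if_neg hm, ← pvIRefStep hp hQN hi, if_neg hm]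
    by_cases hg : (q + 1) ^ K ≤ n
    · rw [if_pos hg]
      have hgN : (Q + 1) ^ K ≤ N := by
        rw [hsq] at hg
        omega
      have hndS : (PySem.List.pyRange ((q + 1) ^ K) (n + 1) ((q + 1) ^ K)).Nodup := by
        refine pvNodupPyRange _ _ _ ?_
        rw [hsq]
        have : 0 < (Q + 1) ^ K := by positivity
        omega
      have hbS : ∀ j ∈ PySem.List.pyRange ((q + 1) ^ K) (n + 1) ((q + 1) ^ K),
          0 ≤ j ∧ j.toNat < N + 1 := by
        intro j hj
        rw [PySem.List.mem_pyRange_iff_of_pos (by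
          rw [hsq]
          have : 0 < (Q + 1) ^ K := by positivity
          omega)] at hj
        obtain ⟨ha, hb, -⟩ := hj
        have : (0 : ℤ) ≤ (q + 1) ^ K := by positivity
        constructor <;> omega
      rw [pvFoldlSetZero (N + 1) _ _ hndS hbS]
      simp only [Prod.mk.injEq]
      refine ⟨hfst, ?_⟩
      apply List.map_congr_left
      intro i hi
      rw [List.mem_range] at hi
      simp only [hsq, hc1, hc2, hc3, ← Nat.cast_pow,
        pvMemStep3 (show 0 < (Q + 1) ^ K by positivity),
        pvMemStep2 (show 0 < Q + 1 by omega)]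
      exact pvMRefStep hp hQN hK1 hi hgN
    · rw [if_neg hg]
      have hgN : ¬ (Q + 1) ^ K ≤ N := by
        rw [hsq] at hg
        omega
      simp only [Prod.mk.injEq]
      refine ⟨hfst, ?_⟩
      apply List.map_congr_left
      intro i hi
      rw [List.mem_range] at hi
      simp only [hc1, hc2, hc3, pvMemStep2 (show 0 < Q + 1 by omega)]
      exact pvMRefStepNoGuard hp hQN hK1 hi hgN
  · rw [if_neg hp, if_neg (by norm_num)]
    simp only [Prod.mk.injEq]
    constructor
    · exact List.map_congr_left (fun i _ => (pvIRefNotPrime hp i).symm)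
    · exact List.map_congr_left (fun i _ => (pvMRefNotPrime hp N K i).symm)

theorem pvFold (n k : ℤ) (hn : 1 ≤ n) (hk : 1 ≤ k) :
    ∀ q : ℤ, 1 ≤ q → q ≤ n →
      (PySem.List.pyRange 2 (q + 1) 1).foldl (pvBody n k) (pvTgt n k 1) = pvTgt n k q := by
  intro q hq
  induction q, hq using Int.le_induction with
  | base =>
    intro _
    rw [PySem.List.pyRange_one_eq_nil (by omega)]
    simp
  | succ q hq ih =>
    intro hqn
    rw [PySem.List.pyRange_one_succ_right (by omega : (2 : ℤ) ≤ q + 1), List.foldl_append,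
      ih (by omega)]
    simp only [List.foldl_cons, List.foldl_nil]
    exact pvStep n k q hn hk hq hqn

theorem pvAMain (n k : ℤ) (hn : 1 ≤ n) (hk : 1 ≤ k) : mobius_k_sieve n k = pvTgt n k n := by
  rw [pvA_eq_fold, pvInit n k hn]
  exact pvFold n k hn hk n (by omega) le_rfl

-- ---- B's trial division computes the factorization data ----

theorem pvExtract_spec : ∀ (fuel m d : ℕ), m ≤ fuel → 2 ≤ d → 0 < m →
    m = d ^ (pvExtract fuel m d).1 * (pvExtract fuel m d).2 ∧ ¬ d ∣ (pvExtract fuel m d).2 := by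
  intro fuel
  induction fuel with
  | zero => intro m d h _ hm; omega
  | succ fuel ih =>
    intro m d hle hd hm
    simp only [pvExtract]
    split
    · rename_i h
      obtain ⟨hd2, hm2, hmod⟩ := h
      have hdm : d ∣ m := Nat.dvd_of_mod_eq_zero hmod
      have hlt : m / d < m := Nat.div_lt_self hm2 (by omega)
      have hpos : 0 < m / d := Nat.div_pos (Nat.le_of_dvd hm2 hdm) (by omega)
      obtain ⟨h1, h2⟩ := ih (m / d) d (by omega) hd hpos
      refine ⟨?_, h2⟩
      calc m = d * (m / d) := (Nat.mul_div_cancel' hdm).symm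
        _ = d * (d ^ (pvExtract fuel (m / d) d).1 * (pvExtract fuel (m / d) d).2) := by rw [← h1]
        _ = d ^ ((pvExtract fuel (m / d) d).1 + 1) * (pvExtract fuel (m / d) d).2 := by ring
    · rename_i h
      refine ⟨by simp, fun hc => h ⟨hd, hm, Nat.mod_eq_zero_of_dvd hc⟩⟩

theorem pvTrialOut (k : ℤ) (m d dist : ℕ) (kf : Bool) (hstop : ¬ d * d ≤ m) (hm : 1 ≤ m)
    (hmin : ∀ p : ℕ, p.Prime → p ∣ m → d ≤ p) :
    ∃ M, ((dist, kf, m) : ℕ × Bool × ℕ) =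
          (dist + (m / M).primeFactors.card,
           kf && decide (∀ p ∈ (m / M).primeFactors, ((m.factorization p : ℤ) < k)),
           M)
      ∧ M ∣ m ∧ (M = 1 ∨ (M.Prime ∧ m.factorization M = 1))
      ∧ (∀ p : ℕ, p.Prime → p ∣ m / M → p * p ≤ m) := by
  have hdi : m = 1 ∨ m.Prime := by
    rcases eq_or_lt_of_le hm with h1 | h2
    · exact Or.inl h1.symm
    · right
      by_contra hnp
      have hsq := Nat.minFac_sq_le_self (by omega) hnp
      have hp := Nat.minFac_prime (show m ≠ 1 by omega)
      have hle := hmin _ hp (Nat.minFac_dvd m)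
      rw [pow_two] at hsq
      nlinarith
  refine ⟨m, ?_, dvd_rfl, ?_, ?_⟩
  · rw [Nat.div_self (by omega)]
    simp
  · rcases hdi with h | h
    · exact Or.inl h
    · exact Or.inr ⟨h, by rw [h.factorization]; simp⟩
  · intro p hp hpd
    rw [Nat.div_self (by omega)] at hpd
    exact absurd (Nat.dvd_one.mp hpd) hp.one_lt.ne'

theorem pvTrial_spec (k : ℤ) : ∀ (fuel m d dist : ℕ) (kf : Bool), 2 * m + 2 ≤ fuel + d →
    2 ≤ d → 1 ≤ m → (∀ p : ℕ, p.Prime → p ∣ m → d ≤ p) →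
    ∃ M, pvTrial fuel k m d dist kf =
          (dist + (m / M).primeFactors.card,
           kf && decide (∀ p ∈ (m / M).primeFactors, ((m.factorization p : ℤ) < k)),
           M)
      ∧ M ∣ m ∧ (M = 1 ∨ (M.Prime ∧ m.factorization M = 1))
      ∧ (∀ p : ℕ, p.Prime → p ∣ m / M → p * p ≤ m) := by
  intro fuel
  induction fuel with
  | zero =>
    intro m d dist kf hle hd hm hmin
    have hstop : ¬ d * d ≤ m := by
      intro hc
      have h1 : d ≤ d * d := Nat.le_mul_of_pos_left d (by omega)
      omega
    simpa [pvTrial] using pvTrialOut k m d dist kf hstop hm hmin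
  | succ fuel ih =>
    intro m d dist kf hle hd hm hmin
    simp only [pvTrial]
    split
    · rename_i h1
      split
      · rename_i h2
        -- d is the least prime factor of m; divide it out and recurse on the quotient
        have hdm : d ∣ m := Nat.dvd_of_mod_eq_zero h2
        have hm0 : 0 < m := by omega
        have hdp : d.Prime := by
          have hmf := Nat.minFac_prime (show d ≠ 1 by omega)
          have hfd : d.minFac ∣ m := (Nat.minFac_dvd d).trans hdm
          have hge := hmin _ hmf hfd
          have hle' := Nat.minFac_le (show 0 < d by omega)
          have heq : d.minFac = d := le_antisymm hle' hge
          rw [← heq]; exact hmf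
        obtain ⟨he, hnd⟩ := pvExtract_spec m m d le_rfl hd hm0
        set e := (pvExtract m m d).1 with hedef
        set m' := (pvExtract m m d).2 with hmdef
        have hm'pos : 0 < m' := by
          rcases Nat.eq_zero_or_pos m' with h | h
          · rw [h, mul_zero] at he; omega
          · exact h
        have hm'dvd : m' ∣ m := ⟨d ^ e, by rw [he]; ring⟩
        have he1 : 1 ≤ e := by
          rcases Nat.eq_zero_or_pos e with h | h
          · rw [h, pow_zero, one_mul] at he
            exact absurd (he ▸ hdm) hnd
          · exact h
        have h2m' : 2 * m' ≤ m := by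
          have hde : d ≤ d ^ e := Nat.le_self_pow (by omega) d
          calc 2 * m' ≤ d * m' := by nlinarith
            _ ≤ d ^ e * m' := by nlinarith
            _ = m := he.symm
        obtain ⟨M, hres, hMd, hMp, hMsq⟩ := ih m' (d + 1) (dist + 1)
          (kf && !(decide ((e : ℤ) ≥ k))) (by omega) (by omega) hm'pos
          (fun p hp hpd => by
            have hge := hmin p hp (hpd.trans hm'dvd)
            have hne : p ≠ d := fun hpd' => hnd (hpd' ▸ hpd)
            omega)
        have hMpos : 0 < M := Nat.pos_of_dvd_of_pos hMd hm'pos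
        have hqpos : 0 < m' / M := Nat.div_pos (Nat.le_of_dvd hm'pos hMd) hMpos
        have hdivmul : m / M = d ^ e * (m' / M) := by
          rw [he, Nat.mul_div_assoc _ hMd]
        have hdnotmem : d ∉ (m' / M).primeFactors := by
          intro hmem
          obtain ⟨_, hdd, _⟩ := Nat.mem_primeFactors.mp hmem
          exact hnd (hdd.trans (Nat.div_dvd_of_dvd hMd))
        have hpf : (m / M).primeFactors = insert d ((m' / M).primeFactors) := by
          rw [hdivmul, Nat.primeFactors_mul (pow_ne_zero e (by omega)) (by omega)]
          have he' : e = (e - 1) + 1 := by omega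
          rw [he', Nat.primeFactors_pow_succ, hdp.primeFactors, ← Finset.insert_eq]
        have hfd : m.factorization d = e := by
          rw [he, Nat.factorization_mul (pow_ne_zero e (by omega)) (by omega),
              Nat.Prime.factorization_pow hdp]
          simp [Finsupp.single_apply, Nat.factorization_eq_zero_of_not_dvd hnd]
        have hfp : ∀ p : ℕ, p ≠ d → m.factorization p = m'.factorization p := by
          intro p hpne
          rw [he, Nat.factorization_mul (pow_ne_zero e (by omega)) (by omega),
              Nat.Prime.factorization_pow hdp]
          simp [Finsupp.single_apply, hpne.symm]
        refine ⟨M, ?_, hMd.trans hm'dvd, ?_, ?_⟩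
        · rw [hres]
          have hcard : (m / M).primeFactors.card = (m' / M).primeFactors.card + 1 := by
            rw [hpf, Finset.card_insert_of_notMem hdnotmem]
          have hiff2 : (∀ p ∈ (m / M).primeFactors, ((m.factorization p : ℤ) < k)) ↔
              (¬ ((e : ℤ) ≥ k) ∧ ∀ p ∈ (m' / M).primeFactors, ((m'.factorization p : ℤ) < k)) := by
            rw [hpf, Finset.forall_mem_insert, hfd]
            constructor
            · rintro ⟨h3, h4⟩
              refine ⟨by omega, fun p hp => ?_⟩
              rw [← hfp p (fun hpd' => hdnotmem (hpd' ▸ hp))]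
              exact h4 p hp
            · rintro ⟨h3, h4⟩
              refine ⟨by omega, fun p hp => ?_⟩
              rw [hfp p (fun hpd' => hdnotmem (hpd' ▸ hp))]
              exact h4 p hp
          simp only [Prod.mk.injEq]
          refine ⟨by omega, ?_, trivial⟩
          have hd2 : decide (∀ p ∈ (m / M).primeFactors, ((m.factorization p : ℤ) < k))
              = (!(decide (k ≤ (e : ℤ)))
                  && decide (∀ p ∈ (m' / M).primeFactors, ((m'.factorization p : ℤ) < k))) := by
            by_cases hA : k ≤ (e : ℤ) <;>
              by_cases hB : (∀ p ∈ (m' / M).primeFactors, ((m'.factorization p : ℤ) < k))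
            · rw [decide_eq_false (fun hX => (hiff2.mp hX).1 hA), decide_eq_true hA,
                decide_eq_true hB]
              rfl
            · rw [decide_eq_false (fun hX => hB (hiff2.mp hX).2), decide_eq_true hA,
                decide_eq_false hB]
              rfl
            · rw [decide_eq_true (hiff2.mpr ⟨hA, hB⟩), decide_eq_false hA, decide_eq_true hB]
              rfl
            · rw [decide_eq_false (fun hX => hB (hiff2.mp hX).2), decide_eq_false hA,
                decide_eq_false hB]
              rfl
          rw [hd2, Bool.and_assoc]
        · rcases hMp with h | ⟨hMk, hMf⟩
          · exact Or.inl h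
          · refine Or.inr ⟨hMk, ?_⟩
            have hMne : M ≠ d := fun hMe => hnd (hMe ▸ hMd)
            rw [hfp M hMne, hMf]
        · intro p hp hpd
          rw [hdivmul] at hpd
          rcases (Nat.Prime.dvd_mul hp).mp hpd with h | h
          · have := (Nat.prime_dvd_prime_iff_eq hp hdp).mp (hp.dvd_of_dvd_pow h)
            subst this
            exact h1
          · exact le_trans (hMsq p hp h) (Nat.le_of_dvd (by omega) hm'dvd)
      · -- d does not divide m: try the next divisor
        rename_i h2
        exact ih m (d + 1) dist kf (by omega) (by omega) hm
          (fun p hp hpd => by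
            have hge := hmin p hp hpd
            have hne : p ≠ d := fun hpd' =>
              h2 (Nat.mod_eq_zero_of_dvd (hpd' ▸ hpd))
            omega)
    · rename_i h1
      exact pvTrialOut k m d dist kf h1 hm hmin

theorem pvRow (k : ℤ) (i : ℕ) (hi : 1 ≤ i) :
    ((pvTrial (2 * i + 2) k i 2 0 true).2.2 = i ↔ (i = 1 ∨ i.Prime)) ∧
    (let t := pvTrial (2 * i + 2) k i 2 0 true
     let s := if 1 < t.2.2 then (t.1 + 1, t.2.1 && !(decide ((1 : Int) ≥ k)), t.2.2) else t
     s.1 = i.primeFactors.card ∧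
       s.2.1 = decide (∀ p ∈ i.primeFactors, ((i.factorization p : ℤ) < k))) := by
  obtain ⟨M, hres, hMd, hMp, hMsq⟩ := pvTrial_spec k (2 * i + 2) i 2 0 true (by omega) le_rfl hi
    (fun p hp _ => hp.two_le)
  have hiff : (pvTrial (2 * i + 2) k i 2 0 true).2.2 = i ↔ (i = 1 ∨ i.Prime) := by
    rw [hres]
    show M = i ↔ (i = 1 ∨ i.Prime)
    constructor
    · rintro rfl
      rcases hMp with h | ⟨h, _⟩
      · exact Or.inl h
      · exact Or.inr h
    · rintro (rfl | hp)
      · exact Nat.dvd_one.mp hMd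
      · rcases hMp with rfl | ⟨hMk, _⟩
        · exfalso
          have := hMsq i hp (by rw [Nat.div_one])
          nlinarith [hp.two_le]
        · exact (Nat.prime_dvd_prime_iff_eq hMk hp).mp hMd
  refine ⟨hiff, ?_, ?_⟩ <;> rw [hres] <;> rcases hMp with rfl | ⟨hMk, hMf⟩
  · simp
  · have hM1 : 1 < M := hMk.one_lt
    have hMpos : 0 < M := by omega
    have hnm : M ∉ (i / M).primeFactors := by
      intro hmem
      obtain ⟨_, hdd, _⟩ := Nat.mem_primeFactors.mp hmem
      have : M * M ∣ i := by
        have h2 : i = M * (i / M) := (Nat.mul_div_cancel' hMd).symm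
        calc M * M ∣ M * (i / M) := Nat.mul_dvd_mul_left M hdd
          _ = i := h2.symm
      have := (Nat.Prime.pow_dvd_iff_le_factorization hMk (by omega : i ≠ 0)).mp
        (by rw [pow_two]; exact this)
      omega
    have hpf : i.primeFactors = insert M ((i / M).primeFactors) := by
      conv_lhs => rw [show i = M * (i / M) from (Nat.mul_div_cancel' hMd).symm]
      rw [Nat.primeFactors_mul (by omega) (by
          have := Nat.div_pos (Nat.le_of_dvd (by omega) hMd) hMpos
          omega),
        hMk.primeFactors, ← Finset.insert_eq]
    simp only [hres, if_pos hM1]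
    rw [hpf, Finset.card_insert_of_notMem hnm]
    omega
  · simp
  · have hM1 : 1 < M := hMk.one_lt
    have hMpos : 0 < M := by omega
    have hnm : M ∉ (i / M).primeFactors := by
      intro hmem
      obtain ⟨_, hdd, _⟩ := Nat.mem_primeFactors.mp hmem
      have hmm : M * M ∣ i := by
        have h2 : i = M * (i / M) := (Nat.mul_div_cancel' hMd).symm
        calc M * M ∣ M * (i / M) := Nat.mul_dvd_mul_left M hdd
          _ = i := h2.symm
      have := (Nat.Prime.pow_dvd_iff_le_factorization hMk (by omega : i ≠ 0)).mp
        (by rw [pow_two]; exact hmm)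
      omega
    have hpf : i.primeFactors = insert M ((i / M).primeFactors) := by
      conv_lhs => rw [show i = M * (i / M) from (Nat.mul_div_cancel' hMd).symm]
      rw [Nat.primeFactors_mul (by omega) (by
          have := Nat.div_pos (Nat.le_of_dvd (by omega) hMd) hMpos
          omega),
        hMk.primeFactors, ← Finset.insert_eq]
    have hiff2 : (∀ p ∈ i.primeFactors, ((i.factorization p : ℤ) < k)) ↔
        ((∀ p ∈ (i / M).primeFactors, ((i.factorization p : ℤ) < k)) ∧ ¬ ((1 : ℤ) ≥ k)) := by
      rw [hpf, Finset.forall_mem_insert, hMf]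
      constructor
      · rintro ⟨h1, h2⟩
        exact ⟨h2, by push_cast at h1 ⊢; omega⟩
      · rintro ⟨h2, h1⟩
        exact ⟨by push_cast; omega, h2⟩
    simp only [hres, if_pos hM1]
    by_cases hk1 : k ≤ (1 : ℤ) <;>
      by_cases hB : (∀ p ∈ (i / M).primeFactors, ((i.factorization p : ℤ) < k))
    · rw [decide_eq_false (fun hX => (hiff2.mp hX).2 hk1), decide_eq_true hB,
        decide_eq_true hk1]
      rfl
    · rw [decide_eq_false (fun hX => hB (hiff2.mp hX).1), decide_eq_false hB]
      rfl
    · rw [decide_eq_true (hiff2.mpr ⟨hB, hk1⟩), decide_eq_false hk1, decide_eq_true hB]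
      rfl
    · rw [decide_eq_false (fun hX => hB (hiff2.mp hX).1), decide_eq_false hB]
      rfl

-- ---- matching the two characterizations pointwise ----

theorem pvPcountEq {i N : ℕ} (hi : 1 ≤ i) (hN : i ≤ N) :
    pvPcount N i = i.primeFactors.card := by
  unfold pvPcount
  congr 1
  ext p
  simp only [Finset.mem_filter, Finset.mem_range, Nat.mem_primeFactors]
  constructor
  · rintro ⟨_, hp, hd⟩; exact ⟨hp, hd, by omega⟩
  · rintro ⟨hp, hd, _⟩
    have := Nat.le_of_dvd (by omega) hd
    exact ⟨by omega, hp, hd⟩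

theorem pvZeroedIff {i N k' : ℕ} (hi : 1 ≤ i) (hN : i ≤ N) (hk' : 1 ≤ k') :
    pvZeroed N k' N i ↔ ∃ p ∈ i.primeFactors, k' ≤ i.factorization p := by
  constructor
  · rintro ⟨p, _, hpp, _, hpd⟩
    refine ⟨p, Nat.mem_primeFactors.mpr
      ⟨hpp, dvd_trans (dvd_pow_self p (by omega)) hpd, by omega⟩, ?_⟩
    exact (Nat.Prime.pow_dvd_iff_le_factorization hpp (by omega)).mp hpd
  · rintro ⟨p, hpm, hfac⟩
    obtain ⟨hpp, hpd, _⟩ := Nat.mem_primeFactors.mp hpm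
    have hpow : p ^ k' ∣ i := (Nat.Prime.pow_dvd_iff_le_factorization hpp (by omega)).mpr hfac
    have h1 : p ^ k' ≤ i := Nat.le_of_dvd (by omega) hpow
    have h2 : p ≤ p ^ k' := Nat.le_self_pow (by omega) p
    exact ⟨p, Finset.mem_range.mpr (by omega), hpp, by omega, hpow⟩

theorem pvIRefPrime {i N : ℕ} (hN : i ≤ N) : pvIRef N i = if i.Prime then 1 else 0 := by
  by_cases hp : i.Prime
  · have hnm : ¬ pvMarked N i := by
      rintro ⟨p, _, hpp, hpd, hpne⟩
      rcases (Nat.Prime.eq_one_or_self_of_dvd hp p hpd) with h | h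
      · exact hpp.one_lt.ne' h
      · exact hpne h
    simp [pvIRef, hp, hnm, hp.two_le]
  · by_cases h2 : 2 ≤ i
    · obtain ⟨r, hrp, hrd, hrlt⟩ := pvCompositeWitness h2 hp
      have hm : pvMarked N i :=
        ⟨r, Finset.mem_range.mpr (by
          have := Nat.le_of_dvd (by omega) hrd
          omega), hrp, hrd, by omega⟩
      simp [pvIRef, hp, hm]
    · simp [pvIRef, hp, h2]

def pvRowFun (k : ℤ) (i : ℤ) : ℤ × ℤ :=
  let t := pvTrial (2 * i.toNat + 2) k i.toNat 2 0 true
  let s := if 1 < t.2.2 then (t.1 + 1, t.2.1 && !(decide ((1 : Int) ≥ k)), t.2.2) else t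
  ((if 2 ≤ i ∧ (t.2.2 : Int) = i then (1 : Int) else 0),
   (if i = 0 ∨ s.2.1 = false then (0 : Int) else (-1) ^ s.1))

theorem pvRowFunFst (k : ℤ) {i N : ℕ} (hN : i ≤ N) :
    (pvRowFun k (i : ℤ)).1 = pvIRef N i := by
  unfold pvRowFun
  dsimp only
  have hti : ((i : ℤ)).toNat = i := by omega
  rw [hti]
  rcases Nat.eq_zero_or_pos i with rfl | hi
  · rw [if_neg (by rintro ⟨h, _⟩; norm_num at h), pvIRefPrime hN]
    simp [Nat.not_prime_zero]
  · have hiff := (pvRow k i hi).1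
    rw [pvIRefPrime hN]
    by_cases hp : i.Prime
    · rw [if_pos ⟨by exact_mod_cast hp.two_le,
        by exact_mod_cast congrArg (Nat.cast : ℕ → ℤ) (hiff.mpr (Or.inr hp))⟩, if_pos hp]
    · rw [if_neg ?_, if_neg hp]
      rintro ⟨h2, hEq⟩
      have h2' : 2 ≤ i := by exact_mod_cast h2
      have hEq' : (pvTrial (2 * i + 2) k i 2 0 true).2.2 = i := by exact_mod_cast hEq
      rcases hiff.mp hEq' with h | h
      · omega
      · exact hp h

theorem pvRowFunSnd (k : ℤ) (hk : 1 ≤ k) {i N : ℕ} (hN : i ≤ N) :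
    (pvRowFun k (i : ℤ)).2 = pvMRef N k.toNat N i := by
  unfold pvRowFun
  dsimp only
  have hti : ((i : ℤ)).toNat = i := by omega
  rw [hti]
  have hK1 : 1 ≤ k.toNat := by omega
  have hkK : ((k.toNat : ℕ) : ℤ) = k := by omega
  rcases Nat.eq_zero_or_pos i with rfl | hi
  · rw [if_pos (Or.inl (by norm_num))]
    simp [pvMRef]
  · obtain ⟨-, hs⟩ := pvRow k i hi
    obtain ⟨hs1, hs2⟩ := hs
    unfold pvMRef
    rw [if_neg (by omega : ¬ i = 0)]
    by_cases hz : pvZeroed N k.toNat N i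
    · have hnall : ¬ (∀ p ∈ i.primeFactors, ((i.factorization p : ℤ) < k)) := by
        obtain ⟨p, hpm, hfac⟩ := (pvZeroedIff hi hN hK1).mp hz
        intro hall
        have := hall p hpm
        omega
      rw [if_pos (Or.inr (by rw [hs2]; exact decide_eq_false hnall)), if_pos hz]
    · have hall : ∀ p ∈ i.primeFactors, ((i.factorization p : ℤ) < k) := by
        intro p hpm
        by_contra hcon
        exact hz ((pvZeroedIff hi hN hK1).mpr ⟨p, hpm, by omega⟩)
      rw [if_neg ?_, if_neg hz, pvPcountEq hi hN, hs1]
      rintro (h | h)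
      · norm_num at h
        omega
      · rw [hs2, decide_eq_true hall] at h
        exact Bool.true_eq_false.mp h

theorem pvBMain (n k : ℤ) (hn : 1 ≤ n) (hk : 1 ≤ k) : mobius_k_sieve_alt n k = pvTgt n k n := by
  have hB : mobius_k_sieve_alt n k =
      (((PySem.List.pyRange 0 (n + 1) 1).map (pvRowFun k)).map Prod.fst,
       ((PySem.List.pyRange 0 (n + 1) 1).map (pvRowFun k)).map Prod.snd) := rfl
  rw [hB, PySem.List.pyRange_one]
  rw [show ((n + 1 - 0 : ℤ)).toNat = n.toNat + 1 by omega]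
  simp only [List.map_map]
  unfold pvTgt
  simp only [Prod.mk.injEq]
  constructor
  · apply List.map_congr_left
    intro i hi
    rw [List.mem_range] at hi
    show (pvRowFun k (0 + (i : ℤ))).1 = pvIRef n.toNat i
    rw [show (0 + (i : ℤ)) = (i : ℤ) by ring]
    exact pvRowFunFst k (by omega)
  · apply List.map_congr_left
    intro i hi
    rw [List.mem_range] at hi
    show (pvRowFun k (0 + (i : ℤ))).2 = pvMRef n.toNat k.toNat n.toNat i
    rw [show (0 + (i : ℤ)) = (i : ℤ) by ring]
    exact pvRowFunSnd k hk (by omega)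

-- ---- the degenerate corner n = 1 (loop body never runs; any k) ----

theorem pvAOne (k : ℤ) : mobius_k_sieve 1 k = ([0, 0], [0, 1]) := by
  rfl

theorem pvBOne (k : ℤ) : mobius_k_sieve_alt 1 k = ([0, 0], [0, 1]) := by
  have h0 : pvTrial 2 k 0 2 0 true = (0, true, 0) := rfl
  have h1 : pvTrial 4 k 1 2 0 true = (0, true, 1) := rfl
  have hr : PySem.List.pyRange 0 (1 + 1) 1 = [0, 1] := by decide
  unfold mobius_k_sieve_alt
  rw [hr]
  simp [h0, h1]

-- ===== VERDICT (by name: the statement is the Claim_ definition above) =====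
theorem mobius_k_sieve_spec : Claim_equal_mobius_k_sieve := by
  intro n k _ hpre
  rcases hpre with ⟨hn, hk | hone⟩
  · show mobius_k_sieve n k = mobius_k_sieve_alt n k
    rw [pvAMain n k hn hk, pvBMain n k hn hk]
  · subst hone
    show mobius_k_sieve 1 k = mobius_k_sieve_alt 1 k
    rw [pvAOne, pvBOne]
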